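-- pv_equiv track=rewrite | github.com/Ahram-Ahn/mtRNAFeat | src/mtrnafeat/analysis/local_probability.py | _region_majority
-- ===== SOURCE A (Python) =====
-- def _region_majority(region_strs: list[str], lo: int, hi: int) -> str:
--     if not region_strs or hi <= lo:
--         return ""
--     # lo/hi are 0-based; region_strs is parallel to positions.
--     span = region_strs[lo:hi]
--     if not span:
--         return ""
--     counts: dict[str, int] = {}
--     for r in span:
--         counts[r] = counts.get(r, 0) + 1
--     return max(counts.items(), key=lambda kv: kv[1])[0]
-- ===== SOURCE B (Python) =====
-- def _region_majority(region_strs: list[str], lo: int, hi: int) -> str: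
--     if not region_strs or hi <= lo:
--         return ""
--     span = region_strs[lo:hi]
--     if not span:
--         return ""
--     # Candidate elimination: repeatedly take the first remaining value, count it
--     # by how much the working list shrinks when all its occurrences are removed,
--     # and keep the running best.  Strict '<' means the earlier-appearing value
--     # wins ties, matching A's insertion-ordered dict.
--     best = ""
--     best_c = 0
--     work = span
--     while work:
--         h = work[0]
--         rest = [x for x in work if x != h]
--         c = len(work) - len(rest)
--         if best_c < c:
--             best, best_c = h, c
--         work = rest
--     return best
-- ===== Notes on version B (the rewrite author's own statement) =====
-- stated objective: alternative
-- what changed: Replaced the count-dictionary plus max over its items with a candidate-elimination loop: repeatedly count the first remaining value by how much the working list shrinks when it is filtered out, keep the running best (strict improvement, so earlier values win ties), and continue on the remainder.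
import Mathlib
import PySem

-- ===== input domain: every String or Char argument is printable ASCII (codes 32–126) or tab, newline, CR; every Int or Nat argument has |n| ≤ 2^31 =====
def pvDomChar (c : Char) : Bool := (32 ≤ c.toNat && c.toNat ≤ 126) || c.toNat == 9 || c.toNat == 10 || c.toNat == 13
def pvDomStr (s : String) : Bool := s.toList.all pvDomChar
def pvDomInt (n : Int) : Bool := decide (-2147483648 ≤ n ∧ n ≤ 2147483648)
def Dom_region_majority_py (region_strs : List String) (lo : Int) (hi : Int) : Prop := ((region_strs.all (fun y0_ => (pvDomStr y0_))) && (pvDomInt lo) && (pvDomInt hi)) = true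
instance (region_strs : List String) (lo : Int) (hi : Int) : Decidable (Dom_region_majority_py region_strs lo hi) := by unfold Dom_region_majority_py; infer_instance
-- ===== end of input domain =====

-- B replaces A's count-dictionary + max over items with a candidate-elimination loop: count the
-- first remaining value by filtering out its occurrences, keep the running best (earlier wins ties).


-- ===== PORT A =====
def region_majority_py (region_strs : List String) (lo : Int) (hi : Int) : String :=
  if region_strs = [] ∨ hi ≤ lo then ""
  else
    let span := PySem.List.slice region_strs (some lo) (some hi)
    if span = [] then ""
    else
      let counts : PySem.Dict String Int :=
        span.foldl (fun d r => d.insert r (d.getD r 0 + 1)) PySem.Dict.empty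
      match PySem.List.max? counts.items (fun kv => kv.2) with
      | some kv => kv.1
      | none => ""   -- unreachable: span ≠ [] so counts.items ≠ [] (Python max never sees an empty iterable here)

-- ===== PORT B =====
-- the 'while work:' candidate-elimination loop; state = (best, best_c)
def pvBestIter : List String → String × Nat → String × Nat
  | [], best => best
  | h :: t, best =>
    let rest := (h :: t).filter (fun x => x != h)
    let c := (h :: t).length - rest.length
    pvBestIter rest (if best.2 < c then (h, c) else best)
termination_by l _ => l.length
decreasing_by
  simp only [List.filter_cons, bne_self_eq_false]
  exact Nat.lt_succ_of_le (List.length_filter_le _ _)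

def region_majority_py_alt (region_strs : List String) (lo : Int) (hi : Int) : String :=
  if region_strs = [] ∨ hi ≤ lo then ""
  else
    let span := PySem.List.slice region_strs (some lo) (some hi)
    if span = [] then ""
    else (pvBestIter span ("", 0)).1

-- ===== PRECONDITION & SPEC =====
def Spec_region_majority_py (region_strs : List String) (lo : Int) (hi : Int) (out : String) : Prop := out = region_majority_py_alt region_strs lo hi
instance (region_strs : List String) (lo : Int) (hi : Int) (out : String) : Decidable (Spec_region_majority_py region_strs lo hi out) := by unfold Spec_region_majority_py; infer_instance

-- ===== CLAIM (what is proved, stated in full; the proofs are below) =====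
def Claim_equal_region_majority_py : Prop := ∀ (region_strs : List String) (lo : Int) (hi : Int), Dom_region_majority_py region_strs lo hi → Spec_region_majority_py region_strs lo hi (region_majority_py region_strs lo hi)

-- ===== LEMMAS AND PROOFS =====

-- recursive form of the elimination loop, used to reason about pvBestIter
def pvBest : List String → String × Nat
  | [] => ("", 0)
  | h :: t =>
    let rest := (h :: t).filter (fun x => x != h)
    let c := (h :: t).length - rest.length
    if rest = [] then (h, c)
    else
      let p := pvBest rest
      if p.2 ≤ c then (h, c) else p
termination_by l => l.length
decreasing_by
  simp only [List.filter_cons, bne_self_eq_false]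
  exact Nat.lt_succ_of_le (List.length_filter_le _ _)

-- the running "first argmax" loop (Python max keeps the first element attaining the maximum key)
def pvFmax (f : String → Nat) (l : List String) (b : String) : String :=
  l.foldl (fun b x => if f b < f x then x else b) b

theorem pvFmax_nil (f : String → Nat) (b : String) : pvFmax f [] b = b := rfl

theorem pvFmax_cons (f : String → Nat) (x : String) (l : List String) (b : String) :
    pvFmax f (x :: l) b = pvFmax f l (if f b < f x then x else b) := rfl

-- left fold against seed = compare seed against the first-argmax of the tail
theorem pvFmax_seed (f : String → Nat) :
    ∀ (e : List String) (h b : String),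
    pvFmax f (h :: e) b = if f (pvFmax f e h) ≤ f b then b else pvFmax f e h := by
  intro e
  induction e with
  | nil =>
    intro h b
    rw [pvFmax_cons, pvFmax_nil, pvFmax_nil]
    by_cases hc : f b < f h
    · rw [if_pos hc, if_neg (by omega)]
    · rw [if_neg hc, if_pos (by omega)]
  | cons x r ih =>
    intro h b
    rw [pvFmax_cons, ih x _]
    have hM : pvFmax f (x :: r) h = if f (pvFmax f r x) ≤ f h then h else pvFmax f r x := ih x h
    set N := pvFmax f r x with hN
    by_cases hA : f N ≤ f h
    · rw [hM, if_pos hA]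
      by_cases hb : f b < f h
      · rw [if_pos hb, if_pos hA, if_neg (by omega)]
      · rw [if_neg hb, if_pos (by omega), if_pos (by omega)]
    · rw [hM, if_neg hA]
      by_cases hb : f b < f h
      · rw [if_pos hb, if_neg hA, if_neg (by omega)]
      · rw [if_neg hb]

-- the argmax only looks at key values of the seed and list members
theorem pvFmax_congr (f g : String → Nat) :
    ∀ (l : List String) (b : String), (∀ y ∈ b :: l, f y = g y) →
    pvFmax f l b = pvFmax g l b := by
  intro l
  induction l with
  | nil => intro b _; rfl
  | cons x r ih =>
    intro b hfg
    rw [pvFmax_cons, pvFmax_cons]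
    have hb : f b = g b := hfg b (by simp)
    have hx : f x = g x := hfg x (by simp)
    rw [hb, hx]
    by_cases hc : g b < g x
    · rw [if_pos hc]
      exact ih x (fun y hy => hfg y (by simp at hy ⊢; tauto))
    · rw [if_neg hc]
      exact ih b (fun y hy => hfg y (by simp at hy ⊢; tauto))

-- Set.add folds leave their argument as a prefix
theorem pvPrefix (t : List String) : ∀ d : List String, ∃ e, List.foldl PySem.Set.add d t = d ++ e := by
  induction t with
  | nil => intro d; exact ⟨[], by simp⟩
  | cons x t ih =>
    intro d
    simp only [List.foldl_cons]
    rcases ih (PySem.Set.add d x) with ⟨e, he⟩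
    by_cases h : x ∈ d
    · have hadd : PySem.Set.add d x = d := by simp [PySem.Set.add, h]
      exact ⟨e, by rw [hadd]; rw [hadd] at he; exact he⟩
    · have hadd : PySem.Set.add d x = d ++ [x] := by simp [PySem.Set.add, h]
      exact ⟨x :: e, by rw [hadd]; rw [hadd] at he; simpa using he⟩

-- adding an element already in the accumulator is a no-op, so filtered folds agree
theorem pvFoldFilter (h : String) :
    ∀ (t d : List String), h ∈ d →
    List.foldl PySem.Set.add d t = List.foldl PySem.Set.add d (t.filter (fun x => x != h)) := by
  intro t
  induction t with
  | nil => intro d _; rfl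
  | cons x r ih =>
    intro d hd
    by_cases hx : x = h
    · subst hx
      have hadd : PySem.Set.add d x = d := by simp [PySem.Set.add, hd]
      simp only [List.foldl_cons, List.filter_cons, bne_self_eq_false, hadd]
      exact ih d hd
    · have : (x != h) = true := by simp [hx]
      simp only [List.foldl_cons, List.filter_cons, this, if_true]
      exact ih (PySem.Set.add d x) (by simp [PySem.Set.mem_add]; exact Or.inl hd)

-- an element distinct from everything in the fold stays a lone head
theorem pvConsSeed (h : String) :
    ∀ (t d : List String), (∀ y ∈ t, y ≠ h) →
    List.foldl PySem.Set.add (h :: d) t = h :: List.foldl PySem.Set.add d t := by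
  intro t
  induction t with
  | nil => intro d _; rfl
  | cons x r ih =>
    intro d hne
    have hx : x ≠ h := hne x (by simp)
    have hadd : PySem.Set.add (h :: d) x = h :: PySem.Set.add d x := by
      by_cases hm : x ∈ d
      · simp [PySem.Set.add, hm, hx]
      · simp [PySem.Set.add, hm, hx]
    simp only [List.foldl_cons, hadd]
    exact ih (PySem.Set.add d x) (fun y hy => hne y (by simp [hy]))

-- counting by shrinkage: length minus the filtered length is the count of h
theorem pvCountShrink (h : String) :
    ∀ (l : List String), (l.filter (fun x => x != h)).length + l.count h = l.length := by
  intro l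
  induction l with
  | nil => rfl
  | cons x r ih =>
    by_cases hx : x = h
    · subst hx
      simp
      omega
    · simp [hx]
      omega

-- counts of other values survive the filter
theorem pvCountFilter (h k : String) (hk : k ≠ h) :
    ∀ (l : List String), (l.filter (fun x => x != h)).count k = l.count k := by
  intro l
  induction l with
  | nil => rfl
  | cons x r ih =>
    by_cases hx : x = h
    · subst hx
      simp [ih, Ne.symm hk]
    · simp [List.count_cons, hx, ih]

-- the argmax is the seed or one of the list elements
theorem pvFmax_mem (f : String → Nat) : ∀ (l : List String) (b : String), pvFmax f l b ∈ b :: l := by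
  intro l
  induction l with
  | nil => intro b; simp [pvFmax_nil]
  | cons x r ih =>
    intro b
    rw [pvFmax_cons]
    by_cases hc : f b < f x
    · rw [if_pos hc]
      have := ih x
      simp at this ⊢
      tauto
    · rw [if_neg hc]
      have := ih b
      simp at this ⊢
      tauto

-- B's recursion computes the first-argmax (with its count) over the deduplicated span
theorem pvBest_eq :
    ∀ (n : Nat) (span : List String), span.length ≤ n →
    ∀ (h : String) (e : List String), PySem.Set.ofList span = h :: e →
    pvBest span = (pvFmax (fun k => span.count k) e h,
                   span.count (pvFmax (fun k => span.count k) e h)) := by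
  intro n
  induction n with
  | zero =>
    intro span hlen h e hof
    have : span = [] := List.length_eq_zero_iff.mp (Nat.le_zero.mp hlen)
    subst this
    simp [PySem.Set.ofList_nil] at hof
  | succ n ih =>
    intro span hlen h e hof
    cases span with
    | nil => simp [PySem.Set.ofList_nil] at hof
    | cons a t =>
      -- head of the dedup list is the head of the span
      have hof0 : PySem.Set.ofList (a :: t) = List.foldl PySem.Set.add [a] t := by
        simp [PySem.Set.ofList_eq_foldl, PySem.Set.add]
      have hah : a = h := by
        rcases pvPrefix t [a] with ⟨e0, he0⟩
        have : (a :: e0 : List String) = h :: e := by rw [← hof, hof0, he0]; rfl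
        exact (List.cons.injEq _ _ _ _ ▸ this).1
      subst hah
      have he0 : List.foldl PySem.Set.add [a] t = [a] ++ e := by
        rw [← hof0, hof]; rfl
      have hrest : (a :: t).filter (fun x => x != a) = t.filter (fun x => x != a) := by
        simp
      have hc : (a :: t).length - (t.filter (fun x => x != a)).length = (a :: t).count a := by
        have := pvCountShrink a (a :: t)
        rw [hrest] at this
        omega
      rw [pvBest]
      simp only [hrest, hc]
      by_cases hre : t.filter (fun x => x != a) = []
      · -- all of t equals a: the dedup tail is empty
        rw [if_pos hre]
        have henil : e = [] := by
          have h1 : List.foldl PySem.Set.add [a] t = [a] := by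
            rw [pvFoldFilter a t [a] (by simp), hre]; rfl
          have h2 := he0.symm.trans h1
          simpa using h2
        subst henil
        simp only [pvFmax_nil]
      · rw [if_neg hre]
        -- the dedup tail is the dedup list of the filtered remainder
        have hall : ∀ y ∈ t.filter (fun x => x != a), y ≠ a := by
          intro y hy
          have := (List.mem_filter.mp hy).2
          simpa using this
        have heeq : e = PySem.Set.ofList (t.filter (fun x => x != a)) := by
          have h1 : List.foldl PySem.Set.add [a] t
              = a :: List.foldl PySem.Set.add [] (t.filter (fun x => x != a)) := by
            rw [pvFoldFilter a t [a] (by simp)]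
            exact pvConsSeed a _ [] hall
          have h2 : (a :: e : List String) = a :: List.foldl PySem.Set.add [] (t.filter (fun x => x != a)) := by
            rw [← h1, he0]; rfl
          have h3 := (List.cons.injEq _ _ _ _ ▸ h2).2
          rw [h3, PySem.Set.ofList_eq_foldl]
        -- apply the induction hypothesis to the filtered remainder
        obtain ⟨b, r, hbr⟩ : ∃ b r, t.filter (fun x => x != a) = b :: r := by
          cases hx : t.filter (fun x => x != a) with
          | nil => exact absurd hx hre
          | cons b r => exact ⟨b, r, rfl⟩
        rcases pvPrefix r [b] with ⟨e1, he1⟩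
        have hof1 : PySem.Set.ofList (t.filter (fun x => x != a)) = b :: e1 := by
          rw [hbr, PySem.Set.ofList_eq_foldl]
          simpa [PySem.Set.add] using he1
        have hlen1 : (t.filter (fun x => x != a)).length ≤ n := by
          have h1 := List.length_filter_le (fun x => x != a) t
          have h2 : (a :: t).length ≤ n + 1 := hlen
          simp at h2
          omega
        have hIH := ih (t.filter (fun x => x != a)) hlen1 b e1 hof1
        -- counts over the filtered remainder agree with counts over the span
        have hcnt : ∀ y ∈ b :: e1, (t.filter (fun x => x != a)).count y = (a :: t).count y := by
          intro y hy
          have hymem : y ∈ t.filter (fun x => x != a) := by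
            rw [← hof1] at hy
            exact (PySem.Set.mem_ofList _ _).mp hy
          have hyne : y ≠ a := hall y hymem
          rw [← hrest]
          exact pvCountFilter a y hyne (a :: t)
        have hcongr : pvFmax (fun k => (t.filter (fun x => x != a)).count k) e1 b
            = pvFmax (fun k => (a :: t).count k) e1 b :=
          pvFmax_congr _ _ e1 b hcnt
        rw [hIH]
        dsimp only
        rw [hcongr]
        have hvmem : pvFmax (fun k => (a :: t).count k) e1 b ∈ b :: e1 :=
          pvFmax_mem _ e1 b
        have hveq : (t.filter (fun x => x != a)).count (pvFmax (fun k => (a :: t).count k) e1 b)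
            = (a :: t).count (pvFmax (fun k => (a :: t).count k) e1 b) :=
          hcnt _ hvmem
        rw [hveq]
        rw [heeq, hof1, pvFmax_seed (fun k => (a :: t).count k) e1 b a]
        by_cases hcmp : (a :: t).count (pvFmax (fun k => (a :: t).count k) e1 b) ≤ (a :: t).count a
        · rw [if_pos hcmp, if_pos hcmp]
        · rw [if_neg hcmp, if_neg hcmp]

-- folding Python-max's step from a `some` accumulator is a plain pair fold
theorem pvMaxStep_some (step : Option (String × Int) → (String × Int) → Option (String × Int))
    (hstep : ∀ m x, step (some m) x = if m.2 < x.2 then some x else some m)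
    (l : List (String × Int)) :
    ∀ p : String × Int,
    l.foldl step (some p) = some (l.foldl (fun m x => if m.2 < x.2 then x else m) p) := by
  induction l with
  | nil => intro p; rfl
  | cons x l ih =>
    intro p
    rw [List.foldl_cons, hstep, List.foldl_cons]
    by_cases h : p.2 < x.2
    · simp only [if_pos h]; exact ih x
    · simp only [if_neg h]; exact ih p

theorem pvMax?_cons (l : List (String × Int)) (p : String × Int) :
    PySem.List.max? (p :: l) (fun kv => kv.2)
    = some (l.foldl (fun m x => if m.2 < x.2 then x else m) p) := by
  simp only [PySem.List.max?, List.foldl_cons]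
  exact pvMaxStep_some _ (fun _ _ => rfl) l p

-- the pair fold over (k, count k) pairs tracks the string argmax
theorem pvPairFold (f : String → Nat) (l : List String) :
    ∀ b : String,
    (l.map (fun k => (k, (f k : Int)))).foldl (fun m x => if m.2 < x.2 then x else m) (b, (f b : Int))
    = (pvFmax f l b, (f (pvFmax f l b) : Int)) := by
  induction l with
  | nil => intro b; simp [pvFmax_nil]
  | cons x l ih =>
    intro b
    simp only [List.map_cons, List.foldl_cons]
    rw [pvFmax_cons]
    by_cases h : f b < f x
    · have h' : ((f b : Int)) < (f x : Int) := by exact_mod_cast h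
      simp only [if_pos h', if_pos h]
      exact ih x
    · have h' : ¬ ((f b : Int)) < (f x : Int) := by exact_mod_cast h
      simp only [if_neg h', if_neg h]
      exact ih b

-- the running best starts at count 0, so a nonempty span's result is positive
theorem pvBest_pos : ∀ (n : Nat) (span : List String), span.length ≤ n → span ≠ [] →
    1 ≤ (pvBest span).2 := by
  intro n
  induction n with
  | zero =>
    intro span hlen hne
    cases span with
    | nil => exact absurd rfl hne
    | cons a t => simp at hlen
  | succ n ih =>
    intro span hlen hne
    cases span with
    | nil => exact absurd rfl hne
    | cons a t =>
      rw [pvBest]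
      have hrest : (a :: t).filter (fun x => x != a) = t.filter (fun x => x != a) := by simp
      have hlf := List.length_filter_le (fun x => x != a) t
      by_cases hre : (a :: t).filter (fun x => x != a) = []
      · rw [if_pos hre]
        dsimp only
        rw [hrest]
        simp only [List.length_cons]
        omega
      · rw [if_neg hre]
        by_cases hcmp : (pvBest ((a :: t).filter (fun x => x != a))).2
            ≤ (a :: t).length - ((a :: t).filter (fun x => x != a)).length
        · rw [if_pos hcmp]
          dsimp only
          rw [hrest]
          simp only [List.length_cons]
          omega
        · rw [if_neg hcmp]
          have hlen2 : ((a :: t).filter (fun x => x != a)).length ≤ n := by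
            rw [hrest]; simp at hlen; omega
          exact ih _ hlen2 hre

-- the iterative loop computes the recursive elimination, folded against the running best
theorem pvIter_bridge : ∀ (n : Nat) (work : List String), work.length ≤ n →
    ∀ (best : String × Nat),
    pvBestIter work best = if (pvBest work).2 ≤ best.2 then best else pvBest work := by
  intro n
  induction n with
  | zero =>
    intro work hlen best
    have : work = [] := List.length_eq_zero_iff.mp (Nat.le_zero.mp hlen)
    subst this
    rw [pvBestIter, pvBest]
    simp
  | succ n ih =>
    intro work hlen best
    cases work with
    | nil =>
      rw [pvBestIter, pvBest]
      simp
    | cons a t =>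
      rw [pvBestIter, pvBest]
      have hrest : (a :: t).filter (fun x => x != a) = t.filter (fun x => x != a) := by simp
      have hlen2 : ((a :: t).filter (fun x => x != a)).length ≤ n := by
        rw [hrest]
        have := List.length_filter_le (fun x => x != a) t
        simp at hlen
        omega
      rw [ih _ hlen2 _]
      by_cases hre : (a :: t).filter (fun x => x != a) = []
      · rw [if_pos hre, hre, pvBest]
        split_ifs <;> (try dsimp only at *) <;> first | rfl | (exfalso; omega)
      · rw [if_neg hre]
        by_cases hpc : (pvBest ((a :: t).filter (fun x => x != a))).2
            ≤ (a :: t).length - ((a :: t).filter (fun x => x != a)).length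
        · rw [if_pos hpc]
          split_ifs <;> (try dsimp only at *) <;> first | rfl | (exfalso; omega)
        · rw [if_neg hpc]
          split_ifs <;> (try dsimp only at *) <;> first | rfl | (exfalso; omega)

-- the core equality, for an arbitrary nonempty span
theorem pvCore (h : String) (t : List String) :
    (match PySem.List.max?
        ((h :: t).foldl (fun d r => d.insert r (d.getD r 0 + 1)) (PySem.Dict.empty : PySem.Dict String Int)).items
        (fun kv => kv.2) with
      | some kv => kv.1
      | none => "")
    = (pvBestIter (h :: t) ("", 0)).1 := by
  set span := h :: t with hspan
  have hitems : (span.foldl (fun d r => d.insert r (d.getD r 0 + 1)) (PySem.Dict.empty : PySem.Dict String Int)).items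
      = (PySem.Set.ofList span).map (fun k => (k, (span.count k : Int))) := by
    rw [PySem.Dict.foldl_insert_getD_add_one_eq_counter, PySem.Dict.items_counter]
  have hof0 : PySem.Set.ofList span = List.foldl PySem.Set.add [h] t := by
    simp [PySem.Set.ofList, hspan, PySem.Set.add, PySem.Set.empty]
  rcases pvPrefix t [h] with ⟨e, he⟩
  have hof : PySem.Set.ofList span = h :: e := by rw [hof0, he]; rfl
  have hpos : 1 ≤ (pvBest span).2 := pvBest_pos span.length span (le_refl _) (by simp [hspan])
  have hiter : pvBestIter span ("", 0) = pvBest span := by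
    rw [pvIter_bridge span.length span (le_refl _) ("", 0), if_neg (by dsimp only; omega)]
  have hB := pvBest_eq span.length span (le_refl _) h e hof
  rw [hitems, hof]
  simp only [List.map_cons]
  rw [pvMax?_cons, pvPairFold (fun k => span.count k) e h, hiter, hB]

-- ===== VERDICT (by name: the statement is the Claim_ definition above) =====
theorem region_majority_py_spec : Claim_equal_region_majority_py := by
  intro region_strs lo hi _
  unfold Spec_region_majority_py region_majority_py region_majority_py_alt
  by_cases hg : region_strs = [] ∨ hi ≤ lo
  · simp [hg]
  · simp only [if_neg hg]
    cases hspan : PySem.List.slice region_strs (some lo) (some hi) with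
    | nil => simp
    | cons h t => simpa [hspan] using pvCore h t
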